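-- pv_equiv track=rewrite | github.com/GabiNeme/dirf-inteligivel | src/dicionarios.py | funde_dicts_mesmas_chaves
-- ===== SOURCE A (Python) =====
-- def funde_dicts_mesmas_chaves(dicionarios: list[dict], chaves: list[str]) -> dict[dict]:
--     """Funde em um mesmo dicionario se tiverem mesmas chaves.
--
--     Espera receber uma lista de dicionários que serão convertidos em outra lista de
--     dicionários. Caso dois ou mais dicionários compartilhem as mesmas chaves
--     informadas, elas serão unidas em um único dicionário. Nesse caso, será suprimida
--     a duplicação de campos de mesmo nome e os diferentes serão enfileirados. Todos os
--     dicionários devem conter todas as chaves informadas.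
--     """
--
--     def _extrai_tupla_de_chaves(dic):
--         chave_do_dict = []
--         for chave in chaves:
--             chave_do_dict.append(dic[chave])
--         return tuple(chave_do_dict)
--
--     dict_agregado = {}
--
--     for dicionario in dicionarios:
--         chave = _extrai_tupla_de_chaves(dicionario)
--         if chave in dict_agregado:
--             dict_agregado[chave].update(dicionario)
--         else:
--             dict_agregado[chave] = dicionario
--     return dict_agregado
-- ===== SOURCE B (Python) =====
-- def funde_dicts_mesmas_chaves(dicionarios: list[dict], chaves: list[str]) -> dict[dict]:
--     """Group-then-merge: first bucket the dicts by their key tuple, then fold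
--     each bucket into its first dict. Same return value as the one-pass version;
--     like it, mutates the first dict of each group in place via update."""
--     grupos = {}
--     for dicionario in dicionarios:
--         chave = tuple(dicionario[c] for c in chaves)
--         grupos.setdefault(chave, []).append(dicionario)
--
--     resultado = {}
--     for chave, grupo in grupos.items():
--         base = grupo[0]
--         for outro in grupo[1:]:
--             base.update(outro)
--         resultado[chave] = base
--     return resultado
-- ===== Notes on version B (the rewrite author's own statement) =====
-- stated objective: alternative
-- what changed: A merges as it goes in a single pass over the dicts; B first buckets the dicts into per-key-tuple lists with setdefault/append and then, in a second pass over the groups, folds each bucket into its first dict, trading one incremental merge loop for an explicit group-then-merge decomposition of the same cost.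
-- outside the precondition, e.g. on funde_dicts_mesmas_chaves([{'a': '1'}], ['a', 'b']): A raises KeyError, B raises KeyError
import Mathlib
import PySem

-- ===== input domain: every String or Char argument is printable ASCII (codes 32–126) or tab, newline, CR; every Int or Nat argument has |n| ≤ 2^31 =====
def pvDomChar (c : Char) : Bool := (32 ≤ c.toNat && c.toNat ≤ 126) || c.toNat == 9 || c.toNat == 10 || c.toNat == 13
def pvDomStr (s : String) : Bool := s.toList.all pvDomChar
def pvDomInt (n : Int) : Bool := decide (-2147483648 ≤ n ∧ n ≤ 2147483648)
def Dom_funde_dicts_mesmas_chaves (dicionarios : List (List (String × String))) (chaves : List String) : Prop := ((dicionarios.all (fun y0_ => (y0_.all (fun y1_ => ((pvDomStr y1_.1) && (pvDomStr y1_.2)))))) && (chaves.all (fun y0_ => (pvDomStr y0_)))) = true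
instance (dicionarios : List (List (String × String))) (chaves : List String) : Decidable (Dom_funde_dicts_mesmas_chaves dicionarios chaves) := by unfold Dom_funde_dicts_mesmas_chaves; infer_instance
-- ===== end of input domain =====

-- B replaces A's single merge-as-you-go pass by a group-then-merge decomposition (bucket dicts by
-- key tuple, then fold each bucket into its first dict); same return value, no speed claim.
-- Like A, the Python B mutates the first input dict of each group in place; the equivalence proved
-- here is about the RETURN value.

-- ===== PORT A =====
-- _extrai_tupla_de_chaves: loop appending dic[chave]; dic[chave] raises KeyError on a missing
-- key — Pre_ excludes that, so getD "" is exact under Pre_.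
def pvExtrai (chaves : List String) (dic : PySem.Dict String String) : List String :=
  chaves.foldl (fun acc c => acc ++ [dic.getD c ""]) []

-- loop body: if chave in dict_agregado: dict_agregado[chave].update(dicionario) else: assign
def pvStepA (chaves : List String) (agg : PySem.Dict (List String) (PySem.Dict String String))
    (dic : PySem.Dict String String) : PySem.Dict (List String) (PySem.Dict String String) :=
  let chave := pvExtrai chaves dic
  if agg.contains chave then
    agg.insert chave ((agg.getD chave PySem.Dict.empty).update dic.items)
  else
    agg.insert chave dic

def funde_dicts_mesmas_chaves (dicionarios : List (List (String × String))) (chaves : List String) : List (List String × List (String × String)) :=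
  -- each Python dict argument is the PySem.Dict built from its pairs in insertion order
  let ds := dicionarios.map PySem.Dict.ofList
  let dict_agregado := ds.foldl (pvStepA chaves) PySem.Dict.empty
  dict_agregado.items.map (fun p => (p.1, p.2.items))

-- ===== PORT B =====
-- tuple(dicionario[c] for c in chaves); dicionario[c] raises KeyError on a missing key — Pre_
-- excludes that, so getD "" is exact under Pre_.
def pvChaveDe (chaves : List String) (dic : PySem.Dict String String) : List String :=
  chaves.map (fun c => dic.getD c "")

-- base = grupo[0]; for outro in grupo[1:]: base.update(outro)
def pvMergeGrupo (grupo : List (PySem.Dict String String)) : PySem.Dict String String :=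
  match grupo with
  | [] => PySem.Dict.empty
  | base :: resto => resto.foldl (fun b outro => b.update outro.items) base

def funde_dicts_mesmas_chaves_alt (dicionarios : List (List (String × String))) (chaves : List String) : List (List String × List (String × String)) :=
  let ds := dicionarios.map PySem.Dict.ofList
  -- grupos.setdefault(chave, []).append(dicionario)
  let grupos := ds.foldl (fun g dic => g.modify (pvChaveDe chaves dic) [] (fun l => l ++ [dic])) PySem.Dict.empty
  -- resultado[chave] = merged base, in grupos' (= first-encounter) order
  let resultado := grupos.items.foldl (fun r p => r.insert p.1 (pvMergeGrupo p.2)) PySem.Dict.empty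
  resultado.items.map (fun p => (p.1, p.2.items))

-- ===== PRECONDITION & SPEC =====
-- Pre_ excludes exactly the inputs on which the Python A raises KeyError: some informed chave
-- missing from some dicionário (the docstring demands all dicts contain all chaves).
def Pre_funde_dicts_mesmas_chaves (dicionarios : List (List (String × String))) (chaves : List String) : Prop :=
  ∀ d ∈ dicionarios, ∀ c ∈ chaves, c ∈ d.map Prod.fst
instance (dicionarios : List (List (String × String))) (chaves : List String) : Decidable (Pre_funde_dicts_mesmas_chaves dicionarios chaves) := by unfold Pre_funde_dicts_mesmas_chaves; infer_instance

def pvWitness_funde_dicts_mesmas_chaves : (List (List (String × String))) × List String :=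
  ([[("a", "1"), ("b", "2")], [("a", "1"), ("c", "3")], [("a", "4"), ("b", "5")]], ["a"])

def Spec_funde_dicts_mesmas_chaves (dicionarios : List (List (String × String))) (chaves : List String) (out : List (List String × List (String × String))) : Prop := out = funde_dicts_mesmas_chaves_alt dicionarios chaves
instance (dicionarios : List (List (String × String))) (chaves : List String) (out : List (List String × List (String × String))) : Decidable (Spec_funde_dicts_mesmas_chaves dicionarios chaves out) := by unfold Spec_funde_dicts_mesmas_chaves; infer_instance

-- ===== CLAIM (what is proved, stated in full; the proofs are below) =====
def Claim_equal_funde_dicts_mesmas_chaves : Prop := ∀ (dicionarios : List (List (String × String))) (chaves : List String), Dom_funde_dicts_mesmas_chaves dicionarios chaves → Pre_funde_dicts_mesmas_chaves dicionarios chaves → Spec_funde_dicts_mesmas_chaves dicionarios chaves (funde_dicts_mesmas_chaves dicionarios chaves)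

-- ===== LEMMAS AND PROOFS =====

-- A's loop-with-append key extraction is B's map
theorem pvExtrai_eq (chaves : List String) (dic : PySem.Dict String String) :
    pvExtrai chaves dic = pvChaveDe chaves dic := by
  show List.foldl _ [] chaves = _
  rw [PySem.List.foldl_append_singleton_eq_map]
  rfl

-- A's step always inserts at the extracted key
theorem pvStepA_eq (chaves : List String) (agg : PySem.Dict (List String) (PySem.Dict String String))
    (dic : PySem.Dict String String) :
    pvStepA chaves agg dic = agg.insert (pvChaveDe chaves dic)
      (if agg.contains (pvChaveDe chaves dic) then
        (agg.getD (pvChaveDe chaves dic) PySem.Dict.empty).update dic.items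
       else dic) := by
  simp only [pvStepA, pvExtrai_eq]
  split_ifs <;> rfl

theorem foldA_insert_form (chaves : List String) (ds : List (PySem.Dict String String)) :
    ds.foldl (pvStepA chaves) PySem.Dict.empty
      = ds.foldl (fun agg dic => agg.insert (pvChaveDe chaves dic)
          (if agg.contains (pvChaveDe chaves dic) then
            (agg.getD (pvChaveDe chaves dic) PySem.Dict.empty).update dic.items
           else dic)) PySem.Dict.empty := by
  apply List.foldl_ext
  intro agg dic _
  exact pvStepA_eq chaves agg dic

-- keys of A's aggregate: first-encounter order of the extracted keys
theorem keys_foldA (chaves : List String) (ds : List (PySem.Dict String String)) :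
    (ds.foldl (pvStepA chaves) PySem.Dict.empty).keys
      = PySem.Set.ofList (ds.map (pvChaveDe chaves)) := by
  rw [foldA_insert_form, PySem.Dict.keys_foldl_insert_key, PySem.Dict.keys_empty,
    PySem.Set.update_nil_left]

-- keys of B's grouping dict: the same
theorem keys_foldG (chaves : List String) (ds : List (PySem.Dict String String)) :
    (ds.foldl (fun g dic => g.modify (pvChaveDe chaves dic) [] (fun l => l ++ [dic])) PySem.Dict.empty).keys
      = PySem.Set.ofList (ds.map (pvChaveDe chaves)) := by
  rw [PySem.Dict.keys_foldl_modify_key, PySem.Dict.keys_empty, PySem.Set.update_nil_left]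

-- B's grouping dict maps k to the sublist of dicts with extracted key k, in order
theorem getD_foldG (chaves : List String) (ds : List (PySem.Dict String String)) (k : List String) :
    (ds.foldl (fun g dic => g.modify (pvChaveDe chaves dic) [] (fun l => l ++ [dic])) PySem.Dict.empty).getD k []
      = ds.filter (fun dic => pvChaveDe chaves dic == k) := by
  have h : ds.foldl (fun g dic => g.modify (pvChaveDe chaves dic) [] (fun l => l ++ [dic])) PySem.Dict.empty
      = (ds.map (fun dic => (pvChaveDe chaves dic, dic))).foldl
          (fun g p => g.modify p.1 [] (fun l => l ++ [p.2])) PySem.Dict.empty := by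
    rw [List.foldl_map]
  rw [h, PySem.Dict.getD_foldl_modify_append, PySem.Dict.getD_empty]
  simp [List.filter_map, Function.comp_def]

-- A's aggregate maps k to the merge of exactly that sublist
theorem getD_foldA (chaves : List String) (ds : List (PySem.Dict String String)) (k : List String) :
    (ds.foldl (pvStepA chaves) PySem.Dict.empty).getD k PySem.Dict.empty
      = pvMergeGrupo (ds.filter (fun dic => pvChaveDe chaves dic == k)) := by
  induction ds using List.reverseRecOn with
  | nil => simp [pvMergeGrupo, PySem.Dict.getD_empty]
  | append_singleton ds d ih =>
    rw [List.foldl_append, List.foldl_cons, List.foldl_nil, pvStepA_eq,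
      List.filter_append, List.filter_singleton]
    have hc : (ds.foldl (pvStepA chaves) PySem.Dict.empty).contains (pvChaveDe chaves d)
        = decide ((pvChaveDe chaves d) ∈ ds.map (pvChaveDe chaves)) := by
      rw [PySem.Dict.contains_eq_decide_mem_keys, keys_foldA]
      simp [PySem.Set.mem_ofList]
    by_cases hk : pvChaveDe chaves d = k
    · subst hk
      rw [PySem.Dict.getD_insert, if_pos rfl]
      simp only [BEq.rfl, cond_true]
      by_cases hmem : pvChaveDe chaves d ∈ ds.map (pvChaveDe chaves)
      · rw [if_pos (by rw [hc]; simpa using hmem), ih]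
        have hne : ds.filter (fun dic => pvChaveDe chaves dic == pvChaveDe chaves d) ≠ [] := by
          obtain ⟨dic, hdic, hkey⟩ := List.mem_map.mp hmem
          intro hnil
          have := List.filter_eq_nil_iff.mp hnil dic hdic
          simp [hkey] at this
        obtain ⟨h0, t, ht⟩ := List.exists_cons_of_ne_nil hne
        rw [ht]
        simp [pvMergeGrupo, List.foldl_append]
      · have hnil : ds.filter (fun dic => pvChaveDe chaves dic == pvChaveDe chaves d) = [] := by
          rw [List.filter_eq_nil_iff]
          intro dic hdic hbeq
          exact hmem (List.mem_map.mpr ⟨dic, hdic, by simpa using hbeq⟩)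
        rw [if_neg (by rw [hc]; simpa using hmem), hnil]
        simp [pvMergeGrupo]
    · rw [PySem.Dict.getD_insert, if_neg (fun h => hk h.symm), ih]
      have hb : (pvChaveDe chaves d == k) = false := by simpa using hk
      simp [hb]

-- ===== VERDICT (by name: the statement is the Claim_ definition above) =====
theorem funde_dicts_mesmas_chaves_spec : Claim_equal_funde_dicts_mesmas_chaves := by
  intro dicionarios chaves _ _
  unfold Spec_funde_dicts_mesmas_chaves
  simp only [funde_dicts_mesmas_chaves, funde_dicts_mesmas_chaves_alt]
  set ds := dicionarios.map PySem.Dict.ofList with hds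
  set grupos := ds.foldl (fun g dic => g.modify (pvChaveDe chaves dic) [] (fun l => l ++ [dic])) PySem.Dict.empty with hG
  set agg := ds.foldl (pvStepA chaves) PySem.Dict.empty with hA
  have hndG : grupos.keys.Nodup := by
    rw [hG]
    exact PySem.Dict.nodup_keys_foldl_modify_key ds (pvChaveDe chaves) [] _ PySem.Dict.empty
      (by simp [PySem.Dict.keys_empty])
  -- the second loop of B inserts at grupos' distinct, fresh keys, so its items append in order
  have hres : (grupos.items.foldl (fun r p => r.insert p.1 (pvMergeGrupo p.2)) PySem.Dict.empty).items
      = grupos.items.map (fun p => (p.1, pvMergeGrupo p.2)) := by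
    have h := PySem.Dict.items_foldl_insert_fresh (d := PySem.Dict.empty)
      (l := grupos.items) (k := fun p => p.1) (v := fun p => pvMergeGrupo p.2)
      (by intro a _; simp [PySem.Dict.contains_empty])
      (by simpa [PySem.Dict.keys] using hndG)
    simpa using h
  rw [hres]
  -- both items lists are the common key list paired with the merged group of that key
  have hitemsG : grupos.items = grupos.keys.map (fun k => (k, grupos.getD k [])) :=
    PySem.Dict.items_eq_map_keys grupos hndG []
  have hndA : agg.keys.Nodup := by
    rw [hA, foldA_insert_form]
    exact PySem.Dict.nodup_keys_foldl_insert_key ds (pvChaveDe chaves) _ PySem.Dict.empty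
      (by simp [PySem.Dict.keys_empty])
  have hitemsA : agg.items = agg.keys.map (fun k => (k, agg.getD k PySem.Dict.empty)) :=
    PySem.Dict.items_eq_map_keys agg hndA PySem.Dict.empty
  rw [hitemsA, hitemsG]
  rw [hA, keys_foldA, hG, keys_foldG]
  simp only [List.map_map]
  apply List.map_congr_left
  intro k _
  simp only [Function.comp_apply]
  rw [← hA, ← hG, hA, getD_foldA, hG, getD_foldG]
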